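-- pv_equiv track=rewrite | github.com/xtGitCode/eSentral-eBook-Extractor | utils/utils.py | doubledig
-- ===== SOURCE A (Python) =====
-- def doubledig(arr):
--     length = len(arr)
--     x = 0
--     while x < length-1:
--         if arr[x].isdigit():
--             x+=1
--             while (x < length) and (arr[x].isdigit()):
--                 arr[x-1]=''.join(arr[x-1:x+1])
--                 arr.pop(x)
--                 length = length-1
--         x+=1
--     return arr
-- ===== SOURCE B (Python) =====
-- def doubledig(arr):
--     out = []
--     run = []  # pending consecutive digit-strings, not yet emitted
--     for s in arr:
--         if s.isdigit():
--             run.append(s)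
--         else:
--             if run:
--                 out.append(''.join(run))
--                 run = []
--             out.append(s)
--     if run:
--         out.append(''.join(run))
--     arr[:] = out  # same in-place mutation as the original
--     return arr
-- ===== Notes on version B (the rewrite author's own statement) =====
-- stated objective: simpler
-- what changed: A repeatedly rescans and mutates the list in place with nested index-based while loops and pop(x); B is a single forward pass with an accumulator that collects each run of digit-strings and emits its one-shot join.
import Mathlib
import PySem

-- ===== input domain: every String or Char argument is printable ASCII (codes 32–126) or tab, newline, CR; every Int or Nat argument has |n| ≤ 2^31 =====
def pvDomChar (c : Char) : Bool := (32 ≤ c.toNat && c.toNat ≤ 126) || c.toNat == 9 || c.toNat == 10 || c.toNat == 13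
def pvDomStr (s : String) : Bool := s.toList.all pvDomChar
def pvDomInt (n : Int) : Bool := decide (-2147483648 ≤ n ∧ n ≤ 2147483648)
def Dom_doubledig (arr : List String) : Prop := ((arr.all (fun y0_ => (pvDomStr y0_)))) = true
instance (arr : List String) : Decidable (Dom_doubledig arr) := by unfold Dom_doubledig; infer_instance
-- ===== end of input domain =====

-- B replaces A's nested index loops with in-place pops by a single accumulator pass (objective: simpler).
-- Both Pythons mutate arr in place and return it; the final list contents coincide, so the
-- return-value equivalence proved here covers the observable mutation as well.

-- ===== PORT A =====
-- inner loop: while (x < length) and (arr[x].isdigit()): arr[x-1]=''.join(arr[x-1:x+1]); arr.pop(x); length-=1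
-- exact: on every reachable state 0 < x and len = arr.length, so in the branch arr[x-1:x+1] is the
-- two-element slice [arr[x-1], arr[x]] (ported as getD at in-range indices) and pop(x) is eraseIdx x.
def pvInnerA (arr : List String) (len x : Nat) : List String × Nat :=
  if h : x < len ∧ PySem.Str.strIsdigit (arr.getD x "") then
    pvInnerA ((arr.set (x - 1)
        (PySem.Str.join "" [arr.getD (x - 1) "", arr.getD x ""])).eraseIdx x) (len - 1) x
  else (arr, len)
termination_by len
decreasing_by omega

-- the outer loop's termination needs only that the inner loop never increases length
theorem pvInnerA_snd_le (len : Nat) : ∀ (arr : List String) (x : Nat), (pvInnerA arr len x).2 ≤ len := by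
  induction len using Nat.strong_induction_on with
  | _ len ih =>
    intro arr x
    rw [pvInnerA]
    split
    · next h => exact le_trans (ih (len - 1) (by omega) _ _) (by omega)
    · simp

-- outer 'while x < length-1' loop; Python's 'x < length-1' on ints agrees with Nat subtraction since 0 ≤ x
def pvOuterA (arr : List String) (len x : Nat) : List String :=
  if h : x < len - 1 then
    if PySem.Str.strIsdigit (arr.getD x "") then
      let p := pvInnerA arr len (x + 1)
      pvOuterA p.1 p.2 (x + 2)
    else
      pvOuterA arr len (x + 1)
  else arr
termination_by len - x
decreasing_by
  · have := pvInnerA_snd_le len arr (x + 1); omega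
  · omega

def doubledig (arr : List String) : List String := pvOuterA arr arr.length 0

-- ===== PORT B =====
-- one fold over arr with state (out, run): run collects the pending consecutive digit-strings
def pvStepB (st : List String × List String) (s : String) : List String × List String :=
  if PySem.Str.strIsdigit s then (st.1, st.2 ++ [s])
  else ((if st.2.isEmpty then st.1 else st.1 ++ [PySem.Str.join "" st.2]) ++ [s], [])

def doubledig_alt (arr : List String) : List String :=
  let st := arr.foldl pvStepB ([], [])
  if st.2.isEmpty then st.1 else st.1 ++ [PySem.Str.join "" st.2]

-- ===== PRECONDITION & SPEC =====
def Spec_doubledig (arr : List String) (out : List String) : Prop := out = doubledig_alt arr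
instance (arr : List String) (out : List String) : Decidable (Spec_doubledig arr out) := by unfold Spec_doubledig; infer_instance

-- ===== CLAIM (what is proved, stated in full; the proofs are below) =====
def Claim_equal_doubledig : Prop := ∀ (arr : List String), Dom_doubledig arr → Spec_doubledig arr (doubledig arr)

-- ===== LEMMAS AND PROOFS =====

-- canonical description both ports are reduced to:
-- merge each maximal run of digit-strings into its concatenation
def pvSpec : List String → List String
  | [] => []
  | s :: rest =>
    if PySem.Str.strIsdigit s then
      PySem.Str.join "" (s :: rest.takeWhile PySem.Str.strIsdigit)
        :: pvSpec (rest.dropWhile PySem.Str.strIsdigit)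
    else s :: pvSpec rest
termination_by l => l.length
decreasing_by
  · have := List.length_dropWhile_le (p := PySem.Str.strIsdigit) rest; simp; omega
  · simp

-- string-join facts
theorem pv_inter_nil : ∀ (l : List (List Char)), List.intercalate [] l = l.flatten := by
  intro l
  induction l with
  | nil => simp [List.intercalate]
  | cons a t ih =>
    cases t with
    | nil => simp [List.intercalate]
    | cons b t' => simp_all [List.intercalate, List.intersperse]

theorem pv_join_cons (a : String) (l : List String) :
    PySem.Str.join "" (a :: l) = a ++ PySem.Str.join "" l := by
  apply String.toList_injective
  simp [PySem.Chars.join, pv_inter_nil]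

theorem pv_join_nil : PySem.Str.join "" [] = "" := by
  apply String.toList_injective
  simp [PySem.Chars.join, pv_inter_nil]

theorem pv_dropWhile_head {α : Type} (p : α → Bool) :
    ∀ (l : List α) (t : α) (ts : List α), l.dropWhile p = t :: ts → p t = false := by
  intro l
  induction l with
  | nil => intro t ts h; simp [List.dropWhile] at h
  | cons a l ih =>
    intro t ts h
    by_cases hp : p a
    · exact ih t ts (by simpa [List.dropWhile, hp] using h)
    · rw [List.dropWhile_cons_of_neg (by simpa using hp)] at h
      cases h; simpa using hp

-- positional helpers for A's in-place writes
theorem pv_getD_len {α : Type} [Inhabited α] (p : List α) (c : α) (l : List α) (d : α) :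
    (p ++ c :: l).getD p.length d = c := by
  induction p with
  | nil => simp
  | cons a p ih => simpa using ih

theorem pv_getD_len1 {α : Type} [Inhabited α] (p : List α) (c e : α) (l : List α) (d : α) :
    (p ++ c :: e :: l).getD (p.length + 1) d = e := by
  induction p with
  | nil => simp
  | cons a p ih => simpa using ih

theorem pv_set_len {α : Type} (p : List α) (c v : α) (l : List α) :
    (p ++ c :: l).set p.length v = p ++ v :: l := by
  induction p with
  | nil => simp
  | cons a p ih => simpa using ih

theorem pv_erase_len1 {α : Type} (p : List α) (c e : α) (l : List α) :
    (p ++ c :: e :: l).eraseIdx (p.length + 1) = p ++ c :: l := by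
  induction p with
  | nil => simp
  | cons a p ih => simpa using ih

-- the inner loop folds the leading digit-run of rest into cur
theorem pvInnerA_eq (rest : List String) (pre : List String) (cur : String) :
    pvInnerA (pre ++ cur :: rest) (pre.length + 1 + rest.length) (pre.length + 1)
      = (pre ++ (cur ++ PySem.Str.join "" (rest.takeWhile PySem.Str.strIsdigit))
            :: rest.dropWhile PySem.Str.strIsdigit,
         pre.length + 1 + (rest.dropWhile PySem.Str.strIsdigit).length) := by
  induction rest generalizing cur with
  | nil =>
    rw [pvInnerA]
    simp [pv_join_nil]
  | cons r rs ih =>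
    rw [pvInnerA]
    by_cases hd : PySem.Str.strIsdigit r
    · have hcond : pre.length + 1 < pre.length + 1 + (r :: rs).length ∧
          PySem.Str.strIsdigit ((pre ++ cur :: r :: rs).getD (pre.length + 1) "") = true := by
        refine ⟨by simp, ?_⟩
        rw [pv_getD_len1]; exact hd
      rw [dif_pos hcond]
      simp only [Nat.add_sub_cancel]
      rw [pv_getD_len1, pv_getD_len, pv_set_len, pv_erase_len1]
      have hlen : pre.length + 1 + (r :: rs).length - 1 = pre.length + 1 + rs.length := by
        simp
      rw [hlen, ih]
      rw [List.takeWhile_cons_of_pos hd, List.dropWhile_cons_of_pos hd]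
      simp [pv_join_cons, pv_join_nil, String.append_empty, String.append_assoc]
    · rw [dif_neg (by
        intro hcon
        rw [pv_getD_len1] at hcon
        exact hd hcon.2)]
      rw [List.takeWhile_cons_of_neg (by simpa using hd),
          List.dropWhile_cons_of_neg (by simpa using hd)]
      simp [pv_join_nil]

-- the outer loop, started at index x, leaves arr.take x alone and rewrites the rest to pvSpec
theorem pvOuterA_eq (n : Nat) : ∀ (arr : List String) (x : Nat), arr.length - x ≤ n →
    pvOuterA arr arr.length x = arr.take x ++ pvSpec (arr.drop x) := by
  induction n with
  | zero =>
    intro arr x h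
    rw [pvOuterA, dif_neg (by omega)]
    have h1 : arr.drop x = [] := List.drop_eq_nil_of_le (by omega)
    have h2 : arr.take x = arr := List.take_of_length_le (by omega)
    simp [h1, h2, pvSpec]
  | succ n ih =>
    intro arr x h
    rw [pvOuterA]
    by_cases hx : x < arr.length - 1
    · rw [dif_pos hx]
      have hxlen : x < arr.length := by omega
      have hgd : arr.getD x "" = arr[x] := List.getD_eq_getElem arr "" hxlen
      have hsplit : arr.take x ++ arr[x] :: arr.drop (x + 1) = arr := by
        rw [List.getElem_cons_drop, List.take_append_drop]
      have htl : (arr.take x).length = x := by simp [List.length_take]; omega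
      have hdl : (arr.drop (x + 1)).length = arr.length - (x + 1) := by simp
      have hdx : arr.drop x = arr[x] :: arr.drop (x + 1) := (List.getElem_cons_drop hxlen).symm
      by_cases hd : PySem.Str.strIsdigit arr[x]
      · rw [if_pos (by rw [hgd]; exact hd)]
        generalize harx : arr[x] = a at hd hsplit hdx hgd
        -- rewrite the inner-loop call through pvInnerA_eq
        have hcall : pvInnerA arr arr.length (x + 1)
            = (arr.take x ++ (a ++ PySem.Str.join ""
                  ((arr.drop (x + 1)).takeWhile PySem.Str.strIsdigit))
                :: (arr.drop (x + 1)).dropWhile PySem.Str.strIsdigit,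
               x + 1 + ((arr.drop (x + 1)).dropWhile PySem.Str.strIsdigit).length) := by
          have hE := pvInnerA_eq (arr.drop (x + 1)) (arr.take x) a
          rw [htl] at hE
          have hl1 : x + 1 + (arr.drop (x + 1)).length = arr.length := by
            simp [List.length_drop]; omega
          rw [hl1, hsplit] at hE
          exact hE
        rw [hcall]
        set rst' := (arr.drop (x + 1)).dropWhile PySem.Str.strIsdigit with hrst'
        set mrg := a ++ PySem.Str.join ""
            ((arr.drop (x + 1)).takeWhile PySem.Str.strIsdigit) with hmrg
        have hlen' : x + 1 + rst'.length = (arr.take x ++ mrg :: rst').length := by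
          simp only [List.length_append, List.length_cons, htl]
          omega
        rw [hlen', ih (arr.take x ++ mrg :: rst') (x + 2) (by
          have h5 := List.length_dropWhile_le (p := PySem.Str.strIsdigit) (arr.drop (x + 1))
          simp only [hrst', List.length_append, List.length_cons, List.length_take,
            List.length_drop] at h5 ⊢
          omega)]
        have htk : (arr.take x ++ mrg :: rst').take (x + 2)
            = arr.take x ++ mrg :: rst'.take 1 := by
          have h6 : x + 2 = (arr.take x).length + 2 := by omega
          rw [h6, List.take_append]
          simp
        have hdr : (arr.take x ++ mrg :: rst').drop (x + 2) = rst'.drop 1 := by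
          have h6 : x + 2 = (arr.take x).length + 2 := by omega
          rw [h6, List.drop_append]
          simp
        rw [htk, hdr]
        -- right-hand side: unfold pvSpec on arr.drop x = a :: arr.drop (x+1)
        rw [hdx, pvSpec, if_pos hd, pv_join_cons, ← hrst', ← hmrg]
        -- remaining: mrg :: pvSpec rst' = mrg :: (rst'.take 1 ++ pvSpec (rst'.drop 1))
        cases hcases : rst' with
        | nil => simp [pvSpec]
        | cons t ts =>
          have hnt : PySem.Str.strIsdigit t = false :=
            pv_dropWhile_head _ (arr.drop (x + 1)) t ts hcases
          rw [pvSpec, if_neg (by simp only [hnt]; simp)]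
          simp
      · rw [if_neg (by rw [hgd]; exact hd)]
        rw [ih arr (x + 1) (by omega)]
        have htk : arr.take (x + 1) = arr.take x ++ [arr[x]] := by
          rw [List.take_succ]
          simp [List.getElem?_eq_getElem hxlen]
        rw [hdx, pvSpec, if_neg (by simpa using hd)]
        rw [htk, List.append_assoc]
        simp only [List.singleton_append]
    · rw [dif_neg hx]
      by_cases hlen : arr.length ≤ x
      · have h1 : arr.drop x = [] := List.drop_eq_nil_of_le hlen
        have h2 : arr.take x = arr := List.take_of_length_le hlen
        simp [h1, h2, pvSpec]
      · -- exactly one element remains from index x on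
        have hxlen : x < arr.length := by omega
        have hd1 : arr.drop (x + 1) = [] := List.drop_eq_nil_of_le (by omega)
        have hdx : arr.drop x = [arr[x]] := by
          rw [← List.getElem_cons_drop hxlen, hd1]
        have hspec : pvSpec [arr[x]] = [arr[x]] := by
          rw [pvSpec]
          by_cases hd : PySem.Str.strIsdigit arr[x] <;>
            simp [pv_join_cons, pv_join_nil, String.append_empty, List.takeWhile,
              List.dropWhile, pvSpec]
        rw [hdx, hspec]
        conv_lhs => rw [← List.take_append_drop x arr, hdx]
-- B-side: the fold's state described explicitly — pending run, then the rest of the input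
def pvRun (run : List String) : List String → List String
  | [] => if run.isEmpty then [] else [PySem.Str.join "" run]
  | s :: rest =>
    if PySem.Str.strIsdigit s then pvRun (run ++ [s]) rest
    else (if run.isEmpty then [] else [PySem.Str.join "" run]) ++ s :: pvRun [] rest

theorem pvB_main (l : List String) : ∀ (out run : List String),
    (let st := l.foldl pvStepB (out, run);
      if st.2.isEmpty then st.1 else st.1 ++ [PySem.Str.join "" st.2]) = out ++ pvRun run l := by
  induction l with
  | nil =>
    intro out run
    by_cases hr : run.isEmpty <;> simp [pvRun, hr]
  | cons s rest ih =>
    intro out run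
    simp only [List.foldl_cons, pvStepB, pvRun]
    by_cases hd : PySem.Str.strIsdigit s
    · simp only [hd, if_true]
      exact ih out (run ++ [s])
    · simp only [hd, Bool.false_eq_true, if_false]
      rw [ih _ []]
      by_cases hr : run.isEmpty <;> simp [hr]

theorem pvRun_spec (l : List String) : ∀ (run : List String),
    pvRun run l = if run.isEmpty then pvSpec l
      else PySem.Str.join "" (run ++ l.takeWhile PySem.Str.strIsdigit)
            :: pvSpec (l.dropWhile PySem.Str.strIsdigit) := by
  induction l with
  | nil =>
    intro run
    by_cases hr : run.isEmpty <;> simp [pvRun, pvSpec, hr]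
  | cons s rest ih =>
    intro run
    rw [pvRun]
    by_cases hd : PySem.Str.strIsdigit s
    · rw [if_pos hd, ih (run ++ [s]), List.takeWhile_cons_of_pos hd,
        List.dropWhile_cons_of_pos hd,
        if_neg (by simp : ¬((run ++ [s]).isEmpty = true))]
      by_cases hr : run.isEmpty
      · have hrun : run = [] := List.isEmpty_iff.mp hr
        subst hrun
        simp only [List.isEmpty_nil, if_true]
        rw [pvSpec, if_pos hd]
        simp
      · rw [if_neg hr]
        simp
    · have h0 : pvRun [] rest = pvSpec rest := by rw [ih []]; simp
      rw [if_neg hd, h0]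
      by_cases hr : run.isEmpty
      · rw [if_pos hr, if_pos hr, pvSpec, if_neg hd]
        simp
      · rw [if_neg hr, if_neg hr, List.takeWhile_cons_of_neg (by simpa using hd),
          List.dropWhile_cons_of_neg (by simpa using hd), pvSpec, if_neg hd]
        simp

-- ===== VERDICT (by name: the statement is the Claim_ definition above) =====
theorem doubledig_spec : Claim_equal_doubledig := by
  intro arr _
  unfold Spec_doubledig doubledig doubledig_alt
  rw [pvOuterA_eq arr.length arr 0 (by omega), pvB_main arr [] [], pvRun_spec]
  simp
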